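-- pv_equiv track=rewrite | github.com/CClairvoyant/iti0102-2022 | KT/kt1/exam.py | list_move
-- ===== SOURCE A (Python) =====
-- def list_move(initial_list: list, amount: int, factor: int) -> list:
--     """
--     Create amount lists where elements are shifted right by factor.
--
--     This function creates a list with amount of lists inside it.
--     In each sublist, elements are shifted right by factor elements.
--     factor >= 0
--
--     list_move(["a", "b", "c"], 3, 0) => [['a', 'b', 'c'], ['a', 'b', 'c'], ['a', 'b', 'c']]
--     list_move(["a", "b", "c"], 3, 1) => [['a', 'b', 'c'], ['c', 'a', 'b'], ['b', 'c', 'a']]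
--     list_move([1, 2, 3], 3, 2) => [[1, 2, 3], [2, 3, 1], [3, 1, 2]]
--     list_move([1, 2, 3], 4, 1) => [[1, 2, 3], [3, 1, 2], [2, 3, 1], [1, 2, 3]]
--     list_move([], 3, 4) => [[], [], []]
--     """
--     result_list = []
--     for i in range(amount):
--         result_list.append([])
--     for i in range(amount):
--         for i2 in range(len(initial_list)):
--             result_list[i].append(initial_list[(i * -factor + i2) % len(initial_list)])
--     return result_list
-- ===== SOURCE B (Python) =====
-- def list_move(initial_list: list, amount: int, factor: int) -> list:
--     """Build each sublist with one slice-based block rotation instead of per-element modular indexing."""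
--     n = len(initial_list)
--     result = []
--     for i in range(amount):
--         if n == 0:
--             result.append([])
--         else:
--             k = (i * factor) % n
--             result.append(initial_list[-k:] + initial_list[:-k])
--     return result
-- ===== Notes on version B (the rewrite author's own statement) =====
-- stated objective: simpler
-- what changed: B replaces A's two-phase fill (pre-create amount empty buckets, then populate each bucket element-by-element via (i*-factor+i2)%len indexing) with a single pass that appends one slice-based block rotation initial_list[-k:]+initial_list[:-k] per output row, with k=(i*factor)%len.
import Mathlib
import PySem

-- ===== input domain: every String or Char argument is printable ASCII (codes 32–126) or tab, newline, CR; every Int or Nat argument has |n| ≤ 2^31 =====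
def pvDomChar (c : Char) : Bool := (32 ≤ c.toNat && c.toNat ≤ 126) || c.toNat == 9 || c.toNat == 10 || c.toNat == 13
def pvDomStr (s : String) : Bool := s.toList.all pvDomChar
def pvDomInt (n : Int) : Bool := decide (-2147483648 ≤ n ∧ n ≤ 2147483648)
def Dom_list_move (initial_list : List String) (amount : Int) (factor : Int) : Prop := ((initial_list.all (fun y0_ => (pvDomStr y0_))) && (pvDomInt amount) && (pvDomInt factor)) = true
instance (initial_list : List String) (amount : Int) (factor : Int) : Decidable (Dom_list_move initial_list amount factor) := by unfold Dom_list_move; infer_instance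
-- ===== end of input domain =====

-- B builds each sublist with one slice-based block rotation instead of A's per-element modular
-- indexing into pre-created empty buckets; objective: simpler. Both are total, no mutation of arguments.

-- ===== PORT A =====
-- A first appends `amount` empty lists, then fills bucket i element by element with modular indexing.
-- `i` comes from range(amount) so it is nonnegative and `i.toNat` is exact; the modular index is
-- always in [0, len(initial_list)), so pyGetD's default "" is unreachable (Python never raises here).
def list_move (initial_list : List String) (amount : Int) (factor : Int) : List (List String) :=
  let result0 : List (List String) :=
    (PySem.List.pyRange 0 amount 1).foldl (fun acc _ => acc ++ [([] : List String)]) []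
  (PySem.List.pyRange 0 amount 1).foldl (fun res i =>
    (PySem.List.pyRange 0 (initial_list.length : Int) 1).foldl (fun res i2 =>
      res.modify i.toNat (fun row =>
        row ++ [PySem.List.pyGetD initial_list
          (PySem.Int.mod (i * (-factor) + i2) (initial_list.length : Int)) ""])) res) result0

-- ===== PORT B =====
def list_move_alt (initial_list : List String) (amount : Int) (factor : Int) : List (List String) :=
  let n : Int := (initial_list.length : Int)
  (PySem.List.pyRange 0 amount 1).foldl (fun result i =>
    if n = 0 then result ++ [([] : List String)]
    else
      let k := PySem.Int.mod (i * factor) n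
      result ++ [PySem.List.slice initial_list (some (-k)) none ++
                 PySem.List.slice initial_list none (some (-k))]) []

-- ===== PRECONDITION & SPEC =====
def Spec_list_move (initial_list : List String) (amount : Int) (factor : Int) (out : List (List String)) : Prop := out = list_move_alt initial_list amount factor
instance (initial_list : List String) (amount : Int) (factor : Int) (out : List (List String)) : Decidable (Spec_list_move initial_list amount factor out) := by unfold Spec_list_move; infer_instance

-- ===== CLAIM (what is proved, stated in full; the proofs are below) =====
def Claim_equal_list_move : Prop := ∀ (initial_list : List String) (amount : Int) (factor : Int), Dom_list_move initial_list amount factor → Spec_list_move initial_list amount factor (list_move initial_list amount factor)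

-- ===== LEMMAS AND PROOFS =====

-- repeated in-place modification of one fixed bucket fuses into a single modify
theorem pv_foldl_modify_fuse {α β : Type} (l : List β) (t : Nat) (g : β → α → α) :
    ∀ (res : List α),
      l.foldl (fun r i2 => r.modify t (g i2)) res
        = res.modify t (fun row => l.foldl (fun row i2 => g i2 row) row) := by
  induction l with
  | nil =>
      intro res
      have : res.modify t (fun row => row) = res := by
        apply List.ext_getElem <;> simp [List.getElem_modify]
      simp [this]
  | cons b bs ih =>
      intro res
      have hcomp : (res.modify t (g b)).modify t
          (fun row => bs.foldl (fun row i2 => g i2 row) row)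
          = res.modify t (fun row => bs.foldl (fun row i2 => g i2 row) (g b row)) := by
        apply List.ext_getElem <;> simp [List.getElem_modify]
        intro i h1 h2; split <;> rfl
      simp only [List.foldl_cons, ih, hcomp]

-- modify at the boundary between a prefix and an explicit head
theorem pv_modify_boundary {α : Type} (pre : List α) (x : α) (suf : List α) (f : α → α) :
    (pre ++ x :: suf).modify pre.length f = pre ++ f x :: suf := by
  rw [List.modify_eq_take_cons_drop (by simp)]
  simp

-- filling distinct buckets one after another is a map
theorem pv_fill_buckets {α : Type} (F : Nat → α → α) (e : α) :
    ∀ (m : Nat) (suffix : List α),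
      (List.range m).foldl (fun res k => res.modify k (F k)) (List.replicate m e ++ suffix)
        = (List.range m).map (fun k => F k e) ++ suffix := by
  intro m
  induction m with
  | zero => intro suffix; simp
  | succ m ih =>
      intro suffix
      rw [List.range_succ, List.replicate_succ', List.foldl_append, List.append_assoc,
          List.singleton_append, ih (e :: suffix)]
      simpa using pv_modify_boundary ((List.range m).map fun k => F k e) e suffix (F m)

-- one row of A (modular gets) equals one row of B (slice rotation)
theorem pv_row_gets (xs : List String) (i factor : Int) (hn : xs ≠ []) :
    (PySem.List.pyRange 0 (xs.length : Int) 1).map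
        (fun i2 => PySem.List.pyGetD xs (PySem.Int.mod (i * (-factor) + i2) (xs.length : Int)) "")
      = xs.drop (xs.length - (PySem.Int.mod (i * factor) (xs.length : Int)).toNat) ++
        xs.take (xs.length - (PySem.Int.mod (i * factor) (xs.length : Int)).toNat) := by
  have hnl : 0 < xs.length := List.length_pos_of_ne_nil hn
  have hn' : (0:Int) < (xs.length : Int) := by exact_mod_cast hnl
  set n : Int := (xs.length : Int) with hndef
  rw [PySem.Int.mod_eq_emod_of_pos hn']
  have hk0 : 0 ≤ (i * factor) % n := Int.emod_nonneg _ (by omega)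
  have hk1 : (i * factor) % n < n := Int.emod_lt_of_pos _ hn'
  set t : Nat := ((i * factor) % n).toNat with htdef
  have ht : (t : Int) = (i * factor) % n := Int.toNat_of_nonneg hk0
  have htn : t ≤ xs.length := by omega
  apply List.ext_getElem
  · simp [PySem.List.length_pyRange_one]
    omega
  · intro j h1 h2
    have hjn : j < xs.length := by
      simp [PySem.List.length_pyRange_one] at h1; omega
    rw [List.getElem_map, PySem.List.getElem_pyRange_one]
    have hj' : (0:Int) + (j:Int) = (j:Int) := by ring
    rw [hj', PySem.Int.mod_eq_emod_of_pos hn']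
    have hcong : (i * (-factor) + (j:Int)) % n = ((j:Int) - (i * factor) % n) % n := by
      have : i * (-factor) + (j:Int) = (j:Int) - i * factor := by ring
      rw [this, Int.sub_emod ((j:Int)) (i*factor) n,
          Int.sub_emod ((j:Int)) ((i*factor) % n) n, Int.emod_emod_of_dvd _ dvd_rfl]
    set e : Int := (i * (-factor) + (j:Int)) % n with hedef
    have he0 : 0 ≤ e := Int.emod_nonneg _ (by omega)
    have he1 : e < n := Int.emod_lt_of_pos _ hn'
    rw [PySem.List.pyGetD_eq_getElem xs "" he0 (by omega)]
    by_cases hj : (j:Int) < (i * factor) % n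
    · have hev : e = (j:Int) - (i * factor) % n + n :=
        hcong.trans (by rw [← Int.add_emod_right]; exact Int.emod_eq_of_lt (by omega) (by omega))
      have hlen : j < (xs.drop (xs.length - t)).length := by simp; omega
      rw [List.getElem_append_left hlen, List.getElem_drop]
      have : e.toNat = xs.length - t + j := by omega
      simp [this]
    · have hev : e = (j:Int) - (i * factor) % n :=
        hcong.trans (Int.emod_eq_of_lt (by omega) (by omega))
      have hlen : (xs.drop (xs.length - t)).length ≤ j := by simp; omega
      rw [List.getElem_append_right hlen, List.getElem_take]
      have : e.toNat = j - (xs.drop (xs.length - t)).length := by simp; omega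
      simp [this]

theorem pv_row_eq (xs : List String) (i factor : Int) (hn : xs ≠ []) :
    (PySem.List.pyRange 0 (xs.length : Int) 1).map
        (fun i2 => PySem.List.pyGetD xs (PySem.Int.mod (i * (-factor) + i2) (xs.length : Int)) "")
      = PySem.List.slice xs (some (-(PySem.Int.mod (i * factor) (xs.length : Int)))) none ++
        PySem.List.slice xs none (some (-(PySem.Int.mod (i * factor) (xs.length : Int)))) := by
  have hnl : 0 < xs.length := List.length_pos_of_ne_nil hn
  have hn' : (0:Int) < (xs.length : Int) := by exact_mod_cast hnl
  have hk0 : 0 ≤ PySem.Int.mod (i * factor) (xs.length : Int) := PySem.Int.mod_nonneg _ hn'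
  have ht : ((PySem.Int.mod (i * factor) (xs.length : Int)).toNat : Int)
      = PySem.Int.mod (i * factor) (xs.length : Int) := Int.toNat_of_nonneg hk0
  rw [pv_row_gets xs i factor hn]
  rcases Nat.eq_zero_or_pos (PySem.Int.mod (i * factor) (xs.length : Int)).toNat with h0 | hpos
  · have hkk0 : PySem.Int.mod (i * factor) (xs.length : Int) = 0 := by omega
    simp [hkk0, PySem.List.slice_none_none]
    rw [PySem.List.slice_to (xs := xs) (le_refl (0:Int))]
    simp
  · rw [← ht, PySem.List.slice_from_neg_natCast xs _ hpos, PySem.List.slice_to_neg_natCast xs _ hpos]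
    simp only [Int.toNat_natCast]

theorem pv_main : ∀ (initial_list : List String) (amount factor : Int),
    list_move initial_list amount factor = list_move_alt initial_list amount factor := by
  intro xs amount factor
  by_cases hnil : xs = []
  · subst hnil
    simp only [list_move, list_move_alt, List.length_nil, Nat.cast_zero]
    simp [PySem.List.pyRange_one_eq_nil (le_refl (0:Int))]
  · have hnl : 0 < xs.length := List.length_pos_of_ne_nil hnil
    have hn' : (0:Int) < (xs.length : Int) := by exact_mod_cast hnl
    have hne : ¬((xs.length : Int) = 0) := by omega
    have hB : list_move_alt xs amount factor
        = (PySem.List.pyRange 0 amount 1).map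
            (fun i => PySem.List.slice xs (some (-(PySem.Int.mod (i * factor) (xs.length : Int)))) none
              ++ PySem.List.slice xs none (some (-(PySem.Int.mod (i * factor) (xs.length : Int))))) := by
      simp only [list_move_alt]
      simp only [if_neg hne]
      rw [PySem.List.foldl_append_singleton_eq_map]
      simp
    rw [hB]
    simp only [list_move]
    rw [PySem.List.foldl_append_singleton_eq_map]
    simp only [List.nil_append]
    have hfuse : (fun (res : List (List String)) (i : Int) =>
        List.foldl
          (fun res i2 =>
            res.modify i.toNat fun row =>
              row ++ [PySem.List.pyGetD xs (PySem.Int.mod (i * -factor + i2) (xs.length : Int)) ""])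
          res (PySem.List.pyRange 0 (xs.length : Int) 1))
        = fun (res : List (List String)) (i : Int) =>
            res.modify i.toNat fun row =>
              row ++ (PySem.List.pyRange 0 (xs.length : Int) 1).map
                (fun i2 => PySem.List.pyGetD xs (PySem.Int.mod (i * -factor + i2) (xs.length : Int)) "") := by
      funext res i
      rw [pv_foldl_modify_fuse]
      congr 1
      funext row
      exact PySem.List.foldl_append_singleton_eq_map _ _ _
    rw [hfuse]
    rw [List.map_const', PySem.List.length_pyRange_one]
    rw [PySem.List.pyRange_one 0 amount, List.foldl_map, List.map_map]
    simp only [Function.comp_def, zero_add, Int.toNat_natCast]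
    rw [← List.append_nil (List.replicate ((amount - 0).toNat) ([] : List String))]
    rw [pv_fill_buckets]
    simp only [List.append_nil]
    apply List.map_congr_left
    intro k hk
    simpa using pv_row_eq xs (k : Int) factor hnil

-- old pv_row_eq placeholder removed


-- ===== VERDICT (by name: the statement is the Claim_ definition above) =====
theorem list_move_spec : Claim_equal_list_move := by
  intro initial_list amount factor _
  exact pv_main initial_list amount factor
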